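-- pv_equiv track=rewrite | github.com/DarkDragoon2002/UBSGlobalCodingChallenge2025 | routes/safeguard.py | railfence3_decrypt
-- ===== SOURCE A (Python) =====
-- def railfence3_decrypt(ct: str):
--     # Standard 3-rail rail fence decryption
--     n = len(ct)
--     # pattern indices for zigzag rails
--     pattern = []
--     rail = 0
--     dir = 1
--     for i in range(n):
--         pattern.append(rail)
--         rail += dir
--         if rail == 0 or rail == 2:
--             dir *= 1
--         if rail == 2:
--             dir = -1
--         elif rail == 0:
--             dir = 1
--     # Count chars per rail
--     counts = [pattern.count(0), pattern.count(1), pattern.count(2)]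
--     idx = 0
--     rails = []
--     for c in counts:
--         rails.append(list(ct[idx:idx+c]))
--         idx += c
--     # Reconstruct
--     pos = [0, 0, 0]
--     out = []
--     for r in pattern:
--         out.append(rails[r][pos[r]])
--         pos[r] += 1
--     return "".join(out)
-- ===== SOURCE B (Python) =====
-- def railfence3_decrypt(ct: str):
--     # Closed-form inverse permutation: for each plaintext position i, the source
--     # position in the ciphertext is off(rail(i)) + (occurrences of rail(i) before i),
--     # all computed arithmetically (rail pattern has period 4: 0,1,2,1).
--     n = len(ct)
--     c0 = (n + 3) // 4          # chars on rail 0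
--     c1 = n // 2                # chars on rail 1
--     def src(i):
--         m = i % 4
--         if m == 0:
--             return i // 4                  # rail 0
--         if m == 2:
--             return c0 + c1 + i // 4        # rail 2
--         return c0 + i // 2                 # rail 1 (i odd)
--     return "".join(ct[src(i)] for i in range(n))
-- ===== Notes on version B (the rewrite author's own statement) =====
-- stated objective: simpler
-- what changed: Replaces A's zigzag state-machine, per-rail counting, rail slicing and three running counters by a closed-form source-index formula (the rail pattern has period 4), mapping each plaintext position straight to its ciphertext position in one pass.
import Mathlib
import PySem

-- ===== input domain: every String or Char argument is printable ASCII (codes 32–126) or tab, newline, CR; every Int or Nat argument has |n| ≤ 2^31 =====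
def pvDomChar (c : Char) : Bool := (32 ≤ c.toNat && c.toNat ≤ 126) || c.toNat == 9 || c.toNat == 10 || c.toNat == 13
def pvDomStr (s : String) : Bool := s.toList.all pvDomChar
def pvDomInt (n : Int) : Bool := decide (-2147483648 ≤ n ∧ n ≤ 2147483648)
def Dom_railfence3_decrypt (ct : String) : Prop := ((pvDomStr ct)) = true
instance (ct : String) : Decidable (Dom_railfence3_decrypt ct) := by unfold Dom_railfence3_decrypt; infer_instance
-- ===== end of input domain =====

-- B replaces A's zigzag simulation + rail slicing + running counters by one closed-form
-- source-index formula per position (objective: simpler); same return value everywhere.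

-- ===== PORT A =====
-- loop body of A's zigzag pattern construction (the loop variable i is unused in Python too)
def railfence3_patStep (st : List Int × Int × Int) (_ : Int) : List Int × Int × Int :=
  let pattern := st.1 ++ [st.2.1]
  let rail := st.2.1 + st.2.2
  let dir := st.2.2
  let dir := if rail = 0 ∨ rail = 2 then dir * 1 else dir
  let dir := if rail = 2 then (-1 : Int) else if rail = 0 then 1 else dir
  (pattern, rail, dir)

-- loop body of 'for c in counts: rails.append(list(ct[idx:idx+c])); idx += c'
def railfence3_sliceStep (l : List Char) (st : Int × List (List Char)) (c : Int) :
    Int × List (List Char) :=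
  (st.1 + c, st.2 ++ [PySem.List.slice l (some st.1) (some (st.1 + c))])

-- loop body of the reconstruction 'for r in pattern: out.append(rails[r][pos[r]]); pos[r] += 1'.
-- All indices here are in range on every run (pattern values are 0/1/2 and each counter stays
-- below its rail's length), so the total pyGetD/pySetD forms are exact.
def railfence3_reconStep (rails : List (List Char)) (st : List Int × List Char) (r : Int) :
    List Int × List Char :=
  let p := PySem.List.pyGetD st.1 r 0
  let ch := PySem.List.pyGetD (PySem.List.pyGetD rails r []) p ' '
  (PySem.List.pySetD st.1 r (p + 1), st.2 ++ [ch])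

def railfence3_decrypt (ct : String) : String :=
  let n : Int := PySem.Str.len ct
  let s := (PySem.List.pyRange 0 n 1).foldl railfence3_patStep ([], 0, 1)
  let pattern := s.1
  let counts : List Int :=
    [PySem.List.count pattern 0, PySem.List.count pattern 1, PySem.List.count pattern 2]
  let t := counts.foldl (railfence3_sliceStep ct.toList) (0, [])
  let rails := t.2
  let u := pattern.foldl (railfence3_reconStep rails) ([0, 0, 0], [])
  String.ofList u.2

-- ===== PORT B =====
-- B's helper src(i): closed-form ciphertext position of plaintext position i
def railfence3_src (c0 c1 i : Int) : Int :=
  let m := PySem.Int.mod i 4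
  if m = 0 then PySem.Int.floordiv i 4
  else if m = 2 then c0 + c1 + PySem.Int.floordiv i 4
  else c0 + PySem.Int.floordiv i 2

-- src(i) is always in [0, n), so the pyGetD default is unreachable (exact port of ct[src(i)])
def railfence3_decrypt_alt (ct : String) : String :=
  let n : Int := PySem.Str.len ct
  let c0 := PySem.Int.floordiv (n + 3) 4
  let c1 := PySem.Int.floordiv n 2
  String.ofList ((PySem.List.pyRange 0 n 1).map
    (fun i => PySem.List.pyGetD ct.toList (railfence3_src c0 c1 i) ' '))

-- ===== PRECONDITION & SPEC =====
def Spec_railfence3_decrypt (ct : String) (out : String) : Prop := out = railfence3_decrypt_alt ct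
instance (ct : String) (out : String) : Decidable (Spec_railfence3_decrypt ct out) := by
  unfold Spec_railfence3_decrypt; infer_instance

-- ===== CLAIM (what is proved, stated in full; the proofs are below) =====
def Claim_equal_railfence3_decrypt : Prop :=
  ∀ (ct : String), Dom_railfence3_decrypt ct → Spec_railfence3_decrypt ct (railfence3_decrypt ct)

-- ===== LEMMAS AND PROOFS =====

-- rail of position k (the zigzag has period 4: 0,1,2,1)
def pvPat (k : Nat) : Int := if k % 4 = 0 then 0 else if k % 4 = 2 then 2 else 1
-- direction held by A's loop just before iteration k
def pvDir (k : Nat) : Int := if k % 4 = 0 ∨ k % 4 = 1 then 1 else -1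
-- Nat-valued source index (B's src, on naturals)
def pvSrc (n j : Nat) : Nat :=
  if j % 4 = 0 then j / 4
  else if j % 4 = 2 then (n + 3) / 4 + n / 2 + j / 4
  else (n + 3) / 4 + j / 2

theorem pvPatStep_eq (k : Nat) (acc : List Int) (x : Int) :
    railfence3_patStep (acc, pvPat k, pvDir k) x = (acc ++ [pvPat k], pvPat (k + 1), pvDir (k + 1)) := by
  have h : k % 4 = 0 ∨ k % 4 = 1 ∨ k % 4 = 2 ∨ k % 4 = 3 := by omega
  have h1 : (k + 1) % 4 = (k % 4 + 1) % 4 := by omega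
  rcases h with h | h | h | h <;>
    simp [railfence3_patStep, pvPat, pvDir, h, h1]

theorem pvPatLoop (xs : List Int) : ∀ (k : Nat) (acc : List Int),
    xs.foldl railfence3_patStep (acc, pvPat k, pvDir k)
      = (acc ++ (List.range' k xs.length).map pvPat, pvPat (k + xs.length), pvDir (k + xs.length)) := by
  induction xs with
  | nil => intro k acc; simp
  | cons x xs ih =>
      intro k acc
      rw [List.foldl_cons, pvPatStep_eq, ih (k + 1)]
      rw [List.length_cons, List.range'_succ,
          show k + 1 + xs.length = k + (xs.length + 1) from by omega]
      simp

-- pattern of A = map pvPat (range n)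
theorem pvPattern (n : Nat) :
    ((PySem.List.pyRange 0 (n : Int) 1).foldl railfence3_patStep ([], 0, 1)).1
      = (List.range n).map pvPat := by
  have h0 : (() : Unit) = () := rfl
  have : ((0 : Int), (1 : Int)) = (pvPat 0, pvDir 0) := by simp [pvPat, pvDir]
  rw [show (([], (0 : Int), (1 : Int)) : List Int × Int × Int) = ([], pvPat 0, pvDir 0) by
        simp [pvPat, pvDir]]
  rw [pvPatLoop]
  simp [PySem.List.pyRange_zero_natCast, List.range_eq_range']

-- closed forms for the rail counts over a prefix
theorem pvCount0 (i : Nat) : ((List.range i).map pvPat).count 0 = (i + 3) / 4 := by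
  induction i with
  | zero => simp
  | succ i ih =>
      rw [List.range_succ, List.map_append, List.count_append, ih]
      have h : i % 4 = 0 ∨ i % 4 = 1 ∨ i % 4 = 2 ∨ i % 4 = 3 := by omega
      rcases h with h | h | h | h <;> simp [pvPat, h] <;> omega

theorem pvCount1 (i : Nat) : ((List.range i).map pvPat).count 1 = i / 2 := by
  induction i with
  | zero => simp
  | succ i ih =>
      rw [List.range_succ, List.map_append, List.count_append, ih]
      have h : i % 4 = 0 ∨ i % 4 = 1 ∨ i % 4 = 2 ∨ i % 4 = 3 := by omega
      rcases h with h | h | h | h <;> simp [pvPat, h] <;> omega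

theorem pvCount2 (i : Nat) : ((List.range i).map pvPat).count 2 = (i + 1) / 4 := by
  induction i with
  | zero => simp
  | succ i ih =>
      rw [List.range_succ, List.map_append, List.count_append, ih]
      have h : i % 4 = 0 ∨ i % 4 = 1 ∨ i % 4 = 2 ∨ i % 4 = 3 := by omega
      rcases h with h | h | h | h <;> simp [pvPat, h] <;> omega

-- one reconstruction step, for each literal rail value
theorem pvStep0 (r0 r1 r2 : List Char) (x y z : Nat) (out : List Char) :
    railfence3_reconStep [r0, r1, r2] ([(x : Int), (y : Int), (z : Int)], out) 0
      = ([((x + 1 : Nat) : Int), (y : Int), (z : Int)], out ++ [r0.getD x ' ']) := by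
  simp [railfence3_reconStep, PySem.List.pyGetD_ofNat', PySem.List.pySetD_of_nonneg, List.getD]

theorem pvStep1 (r0 r1 r2 : List Char) (x y z : Nat) (out : List Char) :
    railfence3_reconStep [r0, r1, r2] ([(x : Int), (y : Int), (z : Int)], out) 1
      = ([(x : Int), ((y + 1 : Nat) : Int), (z : Int)], out ++ [r1.getD y ' ']) := by
  simp [railfence3_reconStep, PySem.List.pyGetD_ofNat', PySem.List.pySetD_of_nonneg, List.getD]

theorem pvStep2 (r0 r1 r2 : List Char) (x y z : Nat) (out : List Char) :
    railfence3_reconStep [r0, r1, r2] ([(x : Int), (y : Int), (z : Int)], out) 2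
      = ([(x : Int), (y : Int), ((z + 1 : Nat) : Int)], out ++ [r2.getD z ' ']) := by
  simp [railfence3_reconStep, PySem.List.pyGetD_ofNat', PySem.List.pySetD_of_nonneg, List.getD]

-- reconstruction loop invariant
theorem pvRecon (l : List Char) : ∀ i, i ≤ l.length →
    ((List.range i).map pvPat).foldl
        (railfence3_reconStep
          [l.take ((l.length + 3) / 4),
           (l.drop ((l.length + 3) / 4)).take (l.length / 2),
           (l.drop ((l.length + 3) / 4 + l.length / 2)).take ((l.length + 1) / 4)])
        ([0, 0, 0], [])
      = ([(((i + 3) / 4 : Nat) : Int), ((i / 2 : Nat) : Int), (((i + 1) / 4 : Nat) : Int)],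
         (List.range i).map (fun j => l.getD (pvSrc l.length j) ' ')) := by
  intro i
  induction i with
  | zero => intro _; norm_num
  | succ i ih =>
      intro hi
      rw [List.range_succ, List.map_append, List.foldl_append, ih (by omega), List.map_append]
      simp only [List.map_cons, List.map_nil, List.foldl_cons, List.foldl_nil]
      have h4 : i % 4 = 0 ∨ i % 4 = 1 ∨ i % 4 = 2 ∨ i % 4 = 3 := by omega
      rcases h4 with h | h | h | h
      · -- rail 0
        have hp : pvPat i = 0 := by simp [pvPat, h]
        have hlt : (i + 3) / 4 < (l.length + 3) / 4 := by omega
        have e0 : (i + 1 + 3) / 4 = (i + 3) / 4 + 1 := by omega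
        have e1 : (i + 1) / 2 = i / 2 := by omega
        have e2 : (i + 1 + 1) / 4 = (i + 1) / 4 := by omega
        have hsrc : pvSrc l.length i = (i + 3) / 4 := by simp [pvSrc, h]; omega
        rw [hp, pvStep0]
        simp [e0, e1, e2, hsrc, hlt, List.getD]
      · -- rail 1 (i ≡ 1)
        have hp : pvPat i = 1 := by simp [pvPat, h]
        have hlt : i / 2 < l.length / 2 := by omega
        have e0 : (i + 1 + 3) / 4 = (i + 3) / 4 := by omega
        have e1 : (i + 1) / 2 = i / 2 + 1 := by omega
        have e2 : (i + 1 + 1) / 4 = (i + 1) / 4 := by omega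
        have hsrc : pvSrc l.length i = (l.length + 3) / 4 + i / 2 := by simp [pvSrc, h]
        rw [hp, pvStep1]
        simp [e0, e1, e2, hsrc, hlt, List.getD]
      · -- rail 2
        have hp : pvPat i = 2 := by simp [pvPat, h]
        have hlt : (i + 1) / 4 < (l.length + 1) / 4 := by omega
        have e0 : (i + 1 + 3) / 4 = (i + 3) / 4 := by omega
        have e1 : (i + 1) / 2 = i / 2 := by omega
        have e2 : (i + 1 + 1) / 4 = (i + 1) / 4 + 1 := by omega
        have hsrc : pvSrc l.length i
            = (l.length + 3) / 4 + l.length / 2 + (i + 1) / 4 := by simp [pvSrc, h]; omega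
        rw [hp, pvStep2]
        simp [e0, e1, e2, hsrc, hlt, List.getD]
      · -- rail 1 (i ≡ 3)
        have hp : pvPat i = 1 := by simp [pvPat, h]
        have hlt : i / 2 < l.length / 2 := by omega
        have e0 : (i + 1 + 3) / 4 = (i + 3) / 4 := by omega
        have e1 : (i + 1) / 2 = i / 2 + 1 := by omega
        have e2 : (i + 1 + 1) / 4 = (i + 1) / 4 := by omega
        have hsrc : pvSrc l.length i = (l.length + 3) / 4 + i / 2 := by simp [pvSrc, h]
        rw [hp, pvStep1]
        simp [e0, e1, e2, hsrc, hlt, List.getD]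

-- counts of A = closed forms, and A's whole pipeline = the normal form
theorem railfence3_A_norm (ct : String) :
    railfence3_decrypt ct
      = String.ofList ((List.range ct.toList.length).map
          (fun j => ct.toList.getD (pvSrc ct.toList.length j) ' ')) := by
  simp only [railfence3_decrypt]
  have hlen : PySem.Str.len ct = (ct.toList.length : Int) := by
    simp [PySem.Str.len_eq]
  rw [hlen, pvPattern]
  set l := ct.toList with hl
  set n := l.length with hn
  have hc0 : PySem.List.count ((List.range n).map pvPat) 0 = (((n + 3) / 4 : Nat) : Int) := by
    rw [PySem.List.count_eq, pvCount0]
  have hc1 : PySem.List.count ((List.range n).map pvPat) 1 = ((n / 2 : Nat) : Int) := by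
    rw [PySem.List.count_eq, pvCount1]
  have hc2 : PySem.List.count ((List.range n).map pvPat) 2 = (((n + 1) / 4 : Nat) : Int) := by
    rw [PySem.List.count_eq, pvCount2]
  rw [hc0, hc1, hc2]
  have hslices : ([(((n + 3) / 4 : Nat) : Int), ((n / 2 : Nat) : Int),
        (((n + 1) / 4 : Nat) : Int)].foldl (railfence3_sliceStep l) (0, [])).2
      = [l.take ((n + 3) / 4),
         (l.drop ((n + 3) / 4)).take (n / 2),
         (l.drop ((n + 3) / 4 + n / 2)).take ((n + 1) / 4)] := by
    simp only [List.foldl_cons, List.foldl_nil, railfence3_sliceStep]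
    rw [show ((0 : Int) + ((((n + 3) / 4 : Nat)) : Int)) = (((n + 3) / 4 : Nat) : Int) by ring,
        show ((((n + 3) / 4 : Nat) : Int) + ((n / 2 : Nat) : Int))
            = ((((n + 3) / 4 + n / 2 : Nat)) : Int) by push_cast; ring,
        show (((((n + 3) / 4 + n / 2 : Nat)) : Int) + (((n + 1) / 4 : Nat) : Int))
            = ((((n + 3) / 4 + n / 2 + (n + 1) / 4 : Nat)) : Int) by push_cast; ring]
    have t1 : (n + 3) / 4 + n / 2 - (n + 3) / 4 = n / 2 := by omega
    have t2 : (n + 3) / 4 + n / 2 + (n + 1) / 4 - ((n + 3) / 4 + n / 2) = (n + 1) / 4 := by omega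
    rw [PySem.List.slice_zero_start, PySem.List.slice_to_natCast,
        PySem.List.slice_natCast, PySem.List.slice_natCast, t1, t2]
    simp
  rw [hslices, pvRecon l n (by omega)]

theorem railfence3_B_norm (ct : String) :
    railfence3_decrypt_alt ct
      = String.ofList ((List.range ct.toList.length).map
          (fun j => ct.toList.getD (pvSrc ct.toList.length j) ' ')) := by
  simp only [railfence3_decrypt_alt]
  have hlen : PySem.Str.len ct = (ct.toList.length : Int) := by
    simp [PySem.Str.len_eq]
  rw [hlen]
  set l := ct.toList with hl
  set n := l.length with hn
  rw [PySem.List.pyRange_zero_natCast, List.map_map]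
  refine congrArg String.ofList (List.map_congr_left ?_)
  intro j hj
  have hsrc : railfence3_src (PySem.Int.floordiv ((n : Int) + 3) 4)
      (PySem.Int.floordiv (n : Int) 2) ((j : Nat) : Int) = ((pvSrc n j : Nat) : Int) := by
    unfold railfence3_src pvSrc
    rw [PySem.Int.mod_eq_emod_of_pos (by norm_num), PySem.Int.floordiv_eq_ediv_of_pos (by norm_num),
        PySem.Int.floordiv_eq_ediv_of_pos (by norm_num), PySem.Int.floordiv_eq_ediv_of_pos (by norm_num)]
    have h4 : j % 4 = 0 ∨ j % 4 = 1 ∨ j % 4 = 2 ∨ j % 4 = 3 := by omega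
    have hm : ((j : Nat) : Int) % 4 = ((j % 4 : Nat) : Int) := by push_cast; ring
    rw [hm]
    rcases h4 with h | h | h | h <;> rw [h] <;> norm_num [h]
  simp only [Function.comp, hsrc, PySem.List.pyGetD_natCast]

-- ===== VERDICT (by name: the statement is the Claim_ definition above) =====
theorem railfence3_decrypt_spec : Claim_equal_railfence3_decrypt := by
  intro ct _
  unfold Spec_railfence3_decrypt
  rw [railfence3_A_norm, railfence3_B_norm]
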